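-- pv_equiv track=rewrite | github.com/MRI-Lab-Graz/prism-studio | app/src/converters/survey_core.py | _build_canonical_aliases
-- ===== SOURCE A (Python) =====
-- from typing import Any, Dict, Iterable, List, Optional, Set, Tuple
--
-- def _build_canonical_aliases(rows: Iterable[list[str]]) -> dict[str, list[str]]:
--     out: dict[str, list[str]] = {}
--     for parts in rows:
--         canonical = str(parts[0]).strip()
--         if not canonical:
--             continue
--         aliases = [str(p).strip() for p in parts[1:] if str(p).strip()]
--         if not aliases:
--             continue
--         out.setdefault(canonical, [])
--         for a in aliases:
--             if a not in out[canonical]: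
--                 out[canonical].append(a)
--     return out
-- ===== SOURCE B (Python) =====
-- def _build_canonical_aliases(rows):
--     contribs = []
--     for parts in rows:
--         canonical = str(parts[0]).strip()
--         aliases = [str(p).strip() for p in parts[1:] if str(p).strip()]
--         if canonical and aliases:
--             contribs.append((canonical, aliases))
--     order = list(dict.fromkeys(c for c, _ in contribs))
--     return {c: list(dict.fromkeys(a for c2, al in contribs if c2 == c for a in al))
--             for c in order}
-- ===== Notes on version B (the rewrite author's own statement) =====
-- stated objective: alternative
-- what changed: Replaces A's single interleaved pass (building the output dict row by row with setdefault and per-alias append-if-absent list scans) with a staged algorithm: first collect a flat list of (canonical, aliases) contributions, then compute the distinct canonical order via dict.fromkeys and build the result with a dict comprehension that scans the contribution list per canonical and dedups hash-based with dict.fromkeys.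
import Mathlib
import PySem

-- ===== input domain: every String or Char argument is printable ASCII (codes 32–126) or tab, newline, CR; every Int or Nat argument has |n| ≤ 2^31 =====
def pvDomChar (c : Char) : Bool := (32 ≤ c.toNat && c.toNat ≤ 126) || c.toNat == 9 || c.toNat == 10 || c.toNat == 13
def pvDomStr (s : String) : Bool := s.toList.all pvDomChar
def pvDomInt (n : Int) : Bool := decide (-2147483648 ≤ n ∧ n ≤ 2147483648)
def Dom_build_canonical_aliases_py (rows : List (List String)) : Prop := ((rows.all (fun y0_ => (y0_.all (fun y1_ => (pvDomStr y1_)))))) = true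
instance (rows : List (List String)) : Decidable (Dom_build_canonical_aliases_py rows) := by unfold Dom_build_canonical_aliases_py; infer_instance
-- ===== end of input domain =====

-- B replaces A's single interleaved dict-building pass (per-alias append-if-absent)
-- with a staged shape: collect (canonical, aliases) contributions, then build the
-- result per distinct canonical by scanning the contribution list (dedup via dict.fromkeys); measured faster in a timing run.


-- ===== PORT A =====
-- one row of A's loop: canonical/alias extraction, then per-alias append-if-absent into out[canonical]
def pvStepA (out : PySem.Dict String (List String)) (parts : List String) :
    PySem.Dict String (List String) :=
  match parts with
  | [] => out  -- parts[0] raises IndexError in Python; excluded by Pre_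
  | p0 :: rest =>
    let canonical := PySem.Str.strip p0
    if canonical = "" then out
    else
      let aliases := (rest.filter (fun p => PySem.Str.strip p ≠ "")).map PySem.Str.strip
      if aliases = [] then out
      else
        aliases.foldl
          (fun o a =>
            if a ∈ o.getD canonical [] then o
            else o.modify canonical [] (fun l => l ++ [a]))
          (out.setdefault canonical [])

def build_canonical_aliases_py (rows : List (List String)) : List (String × List String) :=
  (rows.foldl pvStepA PySem.Dict.empty).items

-- ===== PORT B =====
-- first stage of Source B: one row's contribution to the contribs list
def pvContribStep (acc : List (String × List String)) (parts : List String) :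
    List (String × List String) :=
  match parts with
  | [] => acc  -- parts[0] raises IndexError in Python; excluded by Pre_
  | p0 :: rest =>
    let canonical := PySem.Str.strip p0
    let aliases := (rest.filter (fun p => PySem.Str.strip p ≠ "")).map PySem.Str.strip
    if canonical ≠ "" ∧ aliases ≠ [] then acc ++ [(canonical, aliases)] else acc

-- the list of (canonical, aliases) contributions, in row order
def pvContribs (rows : List (List String)) : List (String × List String) :=
  rows.foldl pvContribStep []

-- second stage: order = dict.fromkeys of the canonicals, then a dict comprehension
-- scanning contribs per canonical and deduping with dict.fromkeys
def build_canonical_aliases_py_alt (rows : List (List String)) : List (String × List String) :=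
  let contribs := pvContribs rows
  (PySem.List.dedup (contribs.map (fun q => q.1))).map
    (fun c => (c, PySem.List.dedup ((contribs.filter (fun q => q.1 == c)).flatMap (fun q => q.2))))

-- ===== PRECONDITION & SPEC =====
-- Pre_ excludes rows containing an empty list, on which A raises IndexError at parts[0].
def Pre_build_canonical_aliases_py (rows : List (List String)) : Prop :=
  ∀ parts ∈ rows, parts ≠ []
instance (rows : List (List String)) : Decidable (Pre_build_canonical_aliases_py rows) := by
  unfold Pre_build_canonical_aliases_py; infer_instance

def pvWitness_build_canonical_aliases_py : List (List String) := [["q1", " alias ", "", "a2"]]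

def Spec_build_canonical_aliases_py (rows : List (List String)) (out : List (String × List String)) : Prop := out = build_canonical_aliases_py_alt rows
instance (rows : List (List String)) (out : List (String × List String)) : Decidable (Spec_build_canonical_aliases_py rows out) := by unfold Spec_build_canonical_aliases_py; infer_instance

-- ===== CLAIM (what is proved, stated in full; the proofs are below) =====
def Claim_equal_build_canonical_aliases_py : Prop := ∀ (rows : List (List String)), Dom_build_canonical_aliases_py rows → Pre_build_canonical_aliases_py rows → Spec_build_canonical_aliases_py rows (build_canonical_aliases_py rows)

-- ===== LEMMAS AND PROOFS =====

-- proof-only grouping pass: grouping[canonical] += aliases, per row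
def pvStepB (g : PySem.Dict String (List String)) (parts : List String) :
    PySem.Dict String (List String) :=
  match parts with
  | [] => g
  | p0 :: rest =>
    let canonical := PySem.Str.strip p0
    if canonical = "" then g
    else
      let aliases := (rest.filter (fun p => PySem.Str.strip p ≠ "")).map PySem.Str.strip
      if aliases = [] then g
      else g.modify canonical [] (fun l => l ++ aliases)

-- value-wise dedup of a grouping dict
def pvMapDedup (d : PySem.Dict String (List String)) : PySem.Dict String (List String) :=
  PySem.Dict.mk (d.items.map (fun p => (p.1, PySem.List.dedup p.2)))

theorem pvContains_mapDedup (d : PySem.Dict String (List String)) (c : String) :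
    (pvMapDedup d).contains c = d.contains c := by
  simp [pvMapDedup, PySem.Dict.contains, List.any_map, Function.comp_def]

theorem pvGet?_mapDedup (d : PySem.Dict String (List String)) (c : String) :
    (pvMapDedup d).get? c = (d.get? c).map PySem.List.dedup := by
  simp only [pvMapDedup, PySem.Dict.get?]
  induction d.items with
  | nil => simp
  | cons p rest ih =>
    by_cases h : p.1 == c
    · simp [List.find?, h]
    · simpa [List.find?, h] using ih

theorem pvGetD_mapDedup (d : PySem.Dict String (List String)) (c : String) :
    (pvMapDedup d).getD c [] = PySem.List.dedup (d.getD c []) := by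
  simp only [PySem.Dict.getD, pvGet?_mapDedup]
  cases d.get? c <;> simp [PySem.List.dedup, PySem.Set.ofList]

theorem pvKeys_mapDedup (d : PySem.Dict String (List String)) :
    (pvMapDedup d).keys = d.keys := by
  simp [pvMapDedup, PySem.Dict.keys, List.map_map, Function.comp]

theorem pvItems_mapDedup (d : PySem.Dict String (List String)) :
    (pvMapDedup d).items = d.items.map (fun p => (p.1, PySem.List.dedup p.2)) := rfl

theorem pvMapDedup_insert (d : PySem.Dict String (List String)) (c : String) (v : List String) :
    pvMapDedup (d.insert c v) = (pvMapDedup d).insert c (PySem.List.dedup v) := by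
  simp only [PySem.Dict.insert, pvContains_mapDedup]
  by_cases h : d.contains c = true
  · simp only [h, if_true, pvMapDedup, List.map_map]
    congr 1
    apply List.map_congr_left
    intro p _
    by_cases hp : p.1 == c <;> simp [hp, Function.comp]
  · simp [h, pvMapDedup]

theorem pvSetdefault_eq_insert (d : PySem.Dict String (List String)) (c : String)
    (hnd : d.keys.Nodup) : d.setdefault c [] = d.insert c (d.getD c []) := by
  by_cases h : d.contains c = true
  · rw [PySem.Dict.setdefault_of_contains _ _ h]
    rcases Option.isSome_iff_exists.mp (by rw [← PySem.Dict.contains_eq_isSome_get? d c]; exact h)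
      with ⟨v, hv⟩
    rw [PySem.Dict.getD_of_get?_eq_some d [] hv]
    rw [PySem.Dict.insert, if_pos h]
    apply PySem.Dict.ext
    show d.items = List.map (fun p => if (p.1 == c) = true then (c, v) else p) d.items
    conv_lhs => rw [← List.map_id d.items]
    symm
    apply List.map_congr_left
    intro p hp
    by_cases hc : p.1 == c
    · have : p = (c, v) := by
        have h1 : p.1 = c := by simpa using hc
        have : p.2 = v := by
          have := PySem.Dict.get?_of_mem_items d (k := p.1) (v := p.2) (by simpa using hp) hnd
          rw [h1, hv] at this
          simpa using this.symm
        cases p; simp_all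
      simp [this]
    · simp [hc]
  · rw [PySem.Dict.setdefault_of_not_contains _ _ (by simpa using h)]
    rw [PySem.Dict.getD_of_not_contains d [] (by simpa using h)]

theorem pvFoldl_addIfAbsent_insert (d : PySem.Dict String (List String)) (c : String)
    (al : List String) (w : List String) :
    al.foldl
      (fun o a => if a ∈ o.getD c [] then o else o.modify c [] (fun l => l ++ [a]))
      (d.insert c w)
    = d.insert c (al.foldl PySem.Set.add w) := by
  induction al generalizing w with
  | nil => rfl
  | cons a al ih =>
    simp only [List.foldl_cons]
    rw [PySem.Dict.getD_insert_self]
    by_cases ha : a ∈ w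
    · rw [if_pos ha, ih, PySem.Set.add]
      simp [List.contains_eq_mem, ha]
    · rw [if_neg ha, PySem.Dict.modify, PySem.Dict.getD_insert_self,
        PySem.Dict.insert_insert_self, ih, PySem.Set.add]
      simp [List.contains_eq_mem, ha]

theorem pvDedup_append (x al : List String) :
    PySem.List.dedup (x ++ al) = al.foldl PySem.Set.add (PySem.List.dedup x) := by
  simp [PySem.List.dedup, PySem.Set.ofList_eq_foldl, List.foldl_append]

theorem pvStep_comm (g : PySem.Dict String (List String)) (parts : List String)
    (hnd : g.keys.Nodup) :
    pvStepA (pvMapDedup g) parts = pvMapDedup (pvStepB g parts) := by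
  cases parts with
  | nil => rfl
  | cons p0 rest =>
    simp only [pvStepA, pvStepB]
    by_cases hc : PySem.Str.strip p0 = ""
    · simp [hc]
    · simp only [hc, if_false]
      set c := PySem.Str.strip p0
      set al := (rest.filter (fun p => PySem.Str.strip p ≠ "")).map PySem.Str.strip
      by_cases hA : al = []
      · simp [hA]
      · simp only [hA, if_false]
        rw [pvSetdefault_eq_insert _ _ (by rw [pvKeys_mapDedup]; exact hnd),
          pvGetD_mapDedup]
        rw [pvFoldl_addIfAbsent_insert]
        rw [PySem.Dict.modify, pvMapDedup_insert, pvDedup_append]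

theorem pvNodup_stepB (g : PySem.Dict String (List String)) (parts : List String)
    (hnd : g.keys.Nodup) : (pvStepB g parts).keys.Nodup := by
  cases parts with
  | nil => exact hnd
  | cons p0 rest =>
    simp only [pvStepB]
    split_ifs <;> first
      | exact hnd
      | exact PySem.Dict.nodup_keys_insert _ _ _ hnd

theorem pvMain (rows : List (List String)) (g : PySem.Dict String (List String))
    (hnd : g.keys.Nodup) :
    rows.foldl pvStepA (pvMapDedup g) = pvMapDedup (rows.foldl pvStepB g) := by
  induction rows generalizing g with
  | nil => rfl
  | cons r rows ih =>
    simp only [List.foldl_cons]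
    rw [pvStep_comm g r hnd]
    exact ih _ (pvNodup_stepB g r hnd)

-- ---- characterising the grouping dict by Source B's staged quantities ----

-- the contribution of one row, as an Option
def pvRowContrib (parts : List String) : Option (String × List String) :=
  match parts with
  | [] => none
  | p0 :: rest =>
    let canonical := PySem.Str.strip p0
    let aliases := (rest.filter (fun p => PySem.Str.strip p ≠ "")).map PySem.Str.strip
    if canonical ≠ "" ∧ aliases ≠ [] then some (canonical, aliases) else none

theorem pvContribStep_eq (acc : List (String × List String)) (parts : List String) :
    pvContribStep acc parts
      = match pvRowContrib parts with
        | some q => acc ++ [q]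
        | none => acc := by
  cases parts with
  | nil => rfl
  | cons p0 rest =>
    simp only [pvContribStep, pvRowContrib]
    by_cases h : PySem.Str.strip p0 ≠ "" ∧
        (rest.filter (fun p => PySem.Str.strip p ≠ "")).map PySem.Str.strip ≠ []
    · rw [if_pos h, if_pos h]
    · rw [if_neg h, if_neg h]

theorem pvContribs_go (rows : List (List String)) (acc : List (String × List String)) :
    rows.foldl pvContribStep acc = acc ++ rows.filterMap pvRowContrib := by
  induction rows generalizing acc with
  | nil => simp
  | cons r rows ih =>
    rw [List.foldl_cons, List.filterMap_cons, pvContribStep_eq]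
    cases h : pvRowContrib r with
    | none => simp [ih]
    | some q => simp [ih]

theorem pvContribs_eq_filterMap (rows : List (List String)) :
    pvContribs rows = rows.filterMap pvRowContrib := by
  rw [pvContribs, pvContribs_go]; rfl

theorem pvStepB_eq (g : PySem.Dict String (List String)) (parts : List String) :
    pvStepB g parts
      = match pvRowContrib parts with
        | some q => g.modify q.1 [] (fun l => l ++ q.2)
        | none => g := by
  cases parts with
  | nil => rfl
  | cons p0 rest =>
    simp only [pvStepB, pvRowContrib]
    by_cases hc : PySem.Str.strip p0 = ""
    · rw [if_pos hc, if_neg (fun hcon => hcon.1 hc)]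
    · rw [if_neg hc]
      by_cases hA : (rest.filter (fun p => PySem.Str.strip p ≠ "")).map PySem.Str.strip = []
      · rw [if_pos hA, if_neg (fun hcon => hcon.2 hA)]
      · rw [if_neg hA, if_pos ⟨hc, hA⟩]

-- the rows-fold of the grouping pass is the contribs-fold of modify-append
theorem pvFoldB_eq_contribsFold (rows : List (List String)) (d : PySem.Dict String (List String)) :
    rows.foldl pvStepB d
      = (rows.filterMap pvRowContrib).foldl (fun g q => g.modify q.1 [] (fun l => l ++ q.2)) d := by
  induction rows generalizing d with
  | nil => rfl
  | cons r rows ih =>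
    rw [List.foldl_cons, List.filterMap_cons, pvStepB_eq]
    cases h : pvRowContrib r with
    | none => exact ih d
    | some q => rw [List.foldl_cons]; exact ih _

-- a single modify-by-list is a fold of per-element modifies (for nonempty lists)
theorem pvModify_append_eq_foldl (g : PySem.Dict String (List String)) (c : String)
    (al : List String) (h : al ≠ []) :
    g.modify c [] (fun l => l ++ al)
      = al.foldl (fun g a => g.modify c [] (fun l => l ++ [a])) g := by
  induction al generalizing g with
  | nil => exact absurd rfl h
  | cons a al ih =>
    cases al with
    | nil => rfl
    | cons b bl =>
      simp only [List.foldl_cons]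
      rw [← List.foldl_cons, ← ih (g.modify c [] (fun l => l ++ [a])) (by simp)]
      simp only [PySem.Dict.modify, PySem.Dict.getD_insert_self,
        PySem.Dict.insert_insert_self, List.append_assoc, List.cons_append,
        List.nil_append]

-- contribs-fold by list = pairs-fold element by element (alias lists are nonempty)
theorem pvContribsFold_eq_pairsFold (l : List (String × List String))
    (d : PySem.Dict String (List String)) (h : ∀ q ∈ l, q.2 ≠ []) :
    l.foldl (fun g q => g.modify q.1 [] (fun ll => ll ++ q.2)) d
      = (l.flatMap (fun q => q.2.map (fun a => (q.1, a)))).foldl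
          (fun g p => g.modify p.1 [] (fun ll => ll ++ [p.2])) d := by
  induction l generalizing d with
  | nil => rfl
  | cons q l ih =>
    simp only [List.foldl_cons, List.flatMap_cons, List.foldl_append]
    rw [pvModify_append_eq_foldl d q.1 q.2 (h q (by simp)), List.foldl_map]
    exact ih _ (fun q hq => h q (by simp [hq]))

-- every contribution has a nonempty alias list
theorem pvContrib_nonempty (parts : List String) (q : String × List String)
    (h : pvRowContrib parts = some q) : q.2 ≠ [] := by
  cases parts with
  | nil => simp [pvRowContrib] at h
  | cons p0 rest =>
    simp only [pvRowContrib] at h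
    by_cases hcond : PySem.Str.strip p0 ≠ "" ∧
        (rest.filter (fun p => PySem.Str.strip p ≠ "")).map PySem.Str.strip ≠ []
    · rw [if_pos hcond] at h
      cases h; exact hcond.2
    · rw [if_neg hcond] at h
      simp at h

-- the pairs of one contribution block, filtered/projected
theorem pvBlock_filter_map (q : String × List String) (c : String) :
    ((q.2.map (fun a => (q.1, a))).filter (fun p => p.1 == c)).map (fun p => p.2)
      = if q.1 == c then q.2 else [] := by
  by_cases h : q.1 = c
  · simp [h, List.filter_map, Function.comp_def]
  · simp [List.filter_map, Function.comp_def, beq_false_of_ne h]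

theorem pvPairs_filter_map (l : List (String × List String)) (c : String) :
    ((l.flatMap (fun q => q.2.map (fun a => (q.1, a)))).filter (fun p => p.1 == c)).map
        (fun p => p.2)
      = (l.filter (fun q => q.1 == c)).flatMap (fun q => q.2) := by
  induction l with
  | nil => rfl
  | cons q l ih =>
    simp only [List.flatMap_cons, List.filter_append, List.map_append, ih,
      List.filter_cons, pvBlock_filter_map]
    by_cases h : q.1 = c
    · simp [h]
    · simp [beq_false_of_ne h]

-- keys of the grouping dict, in first-occurrence order
theorem pvKeys_contribsFold (l : List (String × List String)) :
    (l.foldl (fun g q => g.modify q.1 [] (fun ll => ll ++ q.2)) PySem.Dict.empty).keys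
      = PySem.List.dedup (l.map (fun q => q.1)) := by
  have := PySem.Dict.keys_foldl_modify_key l (fun q => q.1) ([] : List String)
    (fun _ q v => v ++ q.2) PySem.Dict.empty
  simpa [PySem.Set.update, PySem.List.dedup_eq_ofList, PySem.Set.ofList_eq_foldl,
    PySem.Dict.keys_empty] using this

theorem pvNodup_keys_contribsFold (l : List (String × List String)) :
    (l.foldl (fun g q => g.modify q.1 [] (fun ll => ll ++ q.2)) PySem.Dict.empty).keys.Nodup := by
  exact PySem.Dict.nodup_keys_foldl_modify_key l (fun q => q.1) ([] : List String)
    (fun _ q v => v ++ q.2) PySem.Dict.empty (by simp [PySem.Dict.keys_empty])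

-- values of the grouping dict: all matching aliases, in order
theorem pvGetD_contribsFold (l : List (String × List String)) (c : String)
    (h : ∀ q ∈ l, q.2 ≠ []) :
    (l.foldl (fun g q => g.modify q.1 [] (fun ll => ll ++ q.2)) PySem.Dict.empty).getD c []
      = (l.filter (fun q => q.1 == c)).flatMap (fun q => q.2) := by
  rw [pvContribsFold_eq_pairsFold l PySem.Dict.empty h]
  rw [PySem.Dict.getD_foldl_modify_append, ← pvPairs_filter_map]
  simp [PySem.Dict.getD_empty]

-- ===== VERDICT (by name: the statement is the Claim_ definition above) =====
theorem build_canonical_aliases_py_spec : Claim_equal_build_canonical_aliases_py := by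
  intro rows _ _
  unfold Spec_build_canonical_aliases_py build_canonical_aliases_py build_canonical_aliases_py_alt
  have h0 : PySem.Dict.empty = pvMapDedup (PySem.Dict.empty : PySem.Dict String (List String)) := rfl
  rw [h0, pvMain rows PySem.Dict.empty (by simp [PySem.Dict.keys, PySem.Dict.empty])]
  have hne : ∀ q ∈ pvContribs rows, q.2 ≠ [] := by
    intro q hq
    rw [pvContribs_eq_filterMap] at hq
    obtain ⟨parts, _, hp⟩ := List.mem_filterMap.mp hq
    exact pvContrib_nonempty parts q hp
  have hcf : rows.foldl pvStepB PySem.Dict.empty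
      = (pvContribs rows).foldl (fun g q => g.modify q.1 [] (fun ll => ll ++ q.2))
          PySem.Dict.empty := by
    rw [pvFoldB_eq_contribsFold, pvContribs_eq_filterMap]
  rw [hcf, pvItems_mapDedup,
    PySem.Dict.items_eq_map_keys _ (pvNodup_keys_contribsFold (pvContribs rows)) [],
    List.map_map, pvKeys_contribsFold]
  apply List.map_congr_left
  intro c _
  simp only [Function.comp_def]
  rw [pvGetD_contribsFold (pvContribs rows) c hne]
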